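-- pv_equiv track=rewrite | github.com/zjz958182284/FantasyBert | fantasybert/core/metrics.py | _bmes_tag_to_spans
-- ===== SOURCE A (Python) =====
-- def _bmes_tag_to_spans(tags, ignore_labels=None):
--     r"""
--     给定一个tags的lis，比如['S-song', 'B-singer', 'M-singer', 'E-singer', 'S-moive', 'S-actor']。
--     返回[('song', (0, 1)), ('singer', (1, 4)), ('moive', (4, 5)), ('actor', (5, 6))] (左闭右开区间)
--     也可以是单纯的['S', 'B', 'M', 'E', 'B', 'M', 'M',...]序列
--
--     :param tags: List[str],
--     :param ignore_labels: List[str], 在该list中的label将被忽略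
--     :return: List[Tuple[str, List[int, int]]]. [(label，[start, end])]
--     """
--     ignore_labels = set(ignore_labels) if ignore_labels else set()
--
--     spans = []
--     prev_bmes_tag = None
--     for idx, tag in enumerate(tags):
--         tag = tag.lower()
--         bmes_tag, label = tag[:1], tag[2:]
--         if bmes_tag in ('b', 's'):
--             spans.append((label, [idx, idx]))
--         elif bmes_tag in ('m', 'e') and prev_bmes_tag in ('b', 'm') and label == spans[-1][0]:
--             spans[-1][1][1] = idx
--         else:
--             spans.append((label, [idx, idx]))
--         prev_bmes_tag = bmes_tag
--     return [(span[0], (span[1][0], span[1][1] + 1))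
--             for span in spans
--             if span[0] not in ignore_labels
--             ]
-- ===== SOURCE B (Python) =====
-- def _bmes_tag_to_spans(tags, ignore_labels=None):
--     ignore_labels = set(ignore_labels) if ignore_labels else set()
--     parsed = [(t.lower()[:1], t.lower()[2:]) for t in tags]
--     n = len(parsed)
--     out = []
--     i = 0
--     while i < n:
--         j = i + 1
--         while (j < n and parsed[j][0] in ('m', 'e')
--                and parsed[j - 1][0] in ('b', 'm')
--                and parsed[j][1] == parsed[j - 1][1]):
--             j += 1
--         label = parsed[i][1]
--         if label not in ignore_labels:
--             out.append((label, (i, j)))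
--         i = j
--     return out
-- ===== Notes on version B (the rewrite author's own statement) =====
-- stated objective: alternative
-- what changed: B parses all tags once into (bmes, label) pairs and then emits each maximal run directly by scanning to its boundary (explicit run decomposition), instead of A's single loop that tracks prev_bmes_tag and mutates the end of spans[-1] in place, followed by a rebuild pass.
import Mathlib
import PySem

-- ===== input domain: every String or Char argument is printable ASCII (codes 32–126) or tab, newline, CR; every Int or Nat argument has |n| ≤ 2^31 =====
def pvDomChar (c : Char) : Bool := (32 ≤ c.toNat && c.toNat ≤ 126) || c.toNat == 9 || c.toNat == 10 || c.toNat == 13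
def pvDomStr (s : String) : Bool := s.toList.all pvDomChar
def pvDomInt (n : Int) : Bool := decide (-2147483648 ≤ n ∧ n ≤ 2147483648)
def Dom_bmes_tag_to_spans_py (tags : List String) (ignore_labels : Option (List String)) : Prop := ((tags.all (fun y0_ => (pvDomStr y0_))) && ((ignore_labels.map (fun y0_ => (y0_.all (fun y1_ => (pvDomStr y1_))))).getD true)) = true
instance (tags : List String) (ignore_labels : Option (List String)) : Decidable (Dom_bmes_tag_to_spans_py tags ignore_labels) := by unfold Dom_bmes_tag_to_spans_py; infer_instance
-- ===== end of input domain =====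

-- B replaces A's running mutation of spans[-1] by an explicit run decomposition: parse all tags
-- once, then repeatedly find the end of the maximal run starting at i and emit that span.
-- Objective: alternative decomposition (same cost); equal return value proved below.

-- ===== PORT A =====
-- loop state: spans as (label, start, lastIdx) triples, prev_bmes_tag, idx
def pvA_loop (spans : List (String × Int × Int)) (prev : Option String) (idx : Int) :
    List String → List (String × Int × Int)
  | [] => spans
  | tag :: rest =>
    let t := PySem.Str.lower tag
    let bmes := PySem.Str.slice t none (some 1)
    let label := PySem.Str.slice t (some 2) none
    if bmes = "b" ∨ bmes = "s" then
      pvA_loop (spans ++ [(label, idx, idx)]) (some bmes) (idx + 1) rest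
    else
      match spans.getLast? with
      | some sp =>
        if (bmes = "m" ∨ bmes = "e") ∧ (prev = some "b" ∨ prev = some "m") ∧ label = sp.1 then
          pvA_loop (spans.dropLast ++ [(sp.1, sp.2.1, idx)]) (some bmes) (idx + 1) rest
        else
          pvA_loop (spans ++ [(label, idx, idx)]) (some bmes) (idx + 1) rest
      | none => -- spans[-1] arm: Python short-circuits before spans[-1] whenever spans is empty
          pvA_loop (spans ++ [(label, idx, idx)]) (some bmes) (idx + 1) rest

-- ignore_labels = set(ignore_labels) if ignore_labels else set()   (shared by both Pythons verbatim)
def pvIgnoreSet (ignore_labels : Option (List String)) : PySem.Set String :=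
  match ignore_labels with
  | some l => if l.isEmpty then PySem.Set.empty else PySem.Set.ofList l
  | none => PySem.Set.empty

def bmes_tag_to_spans_py (tags : List String) (ignore_labels : Option (List String)) : List (String × (Int × Int)) :=
  let ig := pvIgnoreSet ignore_labels
  ((pvA_loop [] none 0 tags).filter (fun sp => !(PySem.Set.contains ig sp.1))).map
    (fun sp => (sp.1, (sp.2.1, sp.2.2 + 1)))

-- ===== PORT B =====
-- parsed[j] = (tag.lower()[:1], tag.lower()[2:])
def pvParse (tag : String) : String × String :=
  let t := PySem.Str.lower tag
  (PySem.Str.slice t none (some 1), PySem.Str.slice t (some 2) none)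

-- Source B's inner while: number of continuation steps after the previously parsed tag `prev`
def pvB_run (prev : String × String) : List (String × String) → Nat
  | [] => 0
  | q :: rest =>
    if (q.1 = "m" ∨ q.1 = "e") ∧ (prev.1 = "b" ∨ prev.1 = "m") ∧ q.2 = prev.2 then
      1 + pvB_run q rest
    else 0

-- Source B's outer while: emit one maximal run per iteration, skipping ignored labels
def pvB_spans (ig : PySem.Set String) (i : Int) : List (String × String) → List (String × (Int × Int))
  | [] => []
  | p :: rest =>
    let k := pvB_run p rest
    let tail := pvB_spans ig (i + k + 1) (rest.drop k)
    if PySem.Set.contains ig p.2 then tail else (p.2, (i, i + k + 1)) :: tail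
termination_by l => l.length
decreasing_by simp

def bmes_tag_to_spans_py_alt (tags : List String) (ignore_labels : Option (List String)) : List (String × (Int × Int)) :=
  pvB_spans (pvIgnoreSet ignore_labels) 0 (tags.map pvParse)

-- ===== PRECONDITION & SPEC =====
def Spec_bmes_tag_to_spans_py (tags : List String) (ignore_labels : Option (List String)) (out : List (String × (Int × Int))) : Prop := out = bmes_tag_to_spans_py_alt tags ignore_labels
instance (tags : List String) (ignore_labels : Option (List String)) (out : List (String × (Int × Int))) : Decidable (Spec_bmes_tag_to_spans_py tags ignore_labels out) := by unfold Spec_bmes_tag_to_spans_py; infer_instance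

-- ===== CLAIM (what is proved, stated in full; the proofs are below) =====
def Claim_equal_bmes_tag_to_spans_py : Prop := ∀ (tags : List String) (ignore_labels : Option (List String)), Dom_bmes_tag_to_spans_py tags ignore_labels → Spec_bmes_tag_to_spans_py tags ignore_labels (bmes_tag_to_spans_py tags ignore_labels)

-- ===== LEMMAS AND PROOFS =====

-- proof-side: B's run decomposition without the ignore filter, as A's (label, start, lastIdx) triples
def specSpans (i : Int) : List (String × String) → List (String × Int × Int)
  | [] => []
  | p :: rest =>
    let k := pvB_run p rest
    (p.2, i, i + k) :: specSpans (i + k + 1) (rest.drop k)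
termination_by l => l.length
decreasing_by simp

theorem specSpans_cons (i : Int) (p : String × String) (rest : List (String × String)) :
    specSpans i (p :: rest)
      = (p.2, i, i + (pvB_run p rest : Int)) ::
          specSpans (i + (pvB_run p rest : Int) + 1) (rest.drop (pvB_run p rest)) := by
  rw [specSpans.eq_def]

-- A's loop invariant: with an open span (lab, st, i-1) on top and prev = b, the loop first
-- extends the open span by the maximal continuation run, then produces B's runs of the remainder.
theorem pvA_loop_eq (tags : List String) : ∀ (spans : List (String × Int × Int)) (lab : String)
    (st : Int) (b : String) (i : Int),
    pvA_loop (spans ++ [(lab, st, i - 1)]) (some b) i tags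
      = spans ++ (lab, st, i - 1 + (pvB_run (b, lab) (tags.map pvParse) : Int)) ::
          specSpans (i + (pvB_run (b, lab) (tags.map pvParse) : Int))
            ((tags.map pvParse).drop (pvB_run (b, lab) (tags.map pvParse))) := by
  induction tags with
  | nil => intro spans lab st b i; simp [pvA_loop, pvB_run, specSpans]
  | cons tag rest IH =>
    intro spans lab st b i
    have hparse : pvParse tag =
        (PySem.Str.slice (PySem.Str.lower tag) none (some 1),
         PySem.Str.slice (PySem.Str.lower tag) (some 2) none) := rfl
    set bmes := PySem.Str.slice (PySem.Str.lower tag) none (some 1) with hbm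
    set label := PySem.Str.slice (PySem.Str.lower tag) (some 2) none with hlb
    rw [List.map_cons]
    by_cases hc : (bmes = "m" ∨ bmes = "e") ∧ (b = "b" ∨ b = "m") ∧ label = lab
    · -- continuation step: A extends spans[-1]
      have hbs : ¬ (bmes = "b" ∨ bmes = "s") := by
        rcases hc.1 with h | h <;> simp [h]
      rw [pvA_loop]
      simp only [← hbm, ← hlb, if_neg hbs, List.getLast?_concat]
      rw [if_pos ⟨hc.1, by rcases hc.2.1 with h | h <;> simp [h], hc.2.2⟩]
      rw [List.dropLast_concat]
      have hIH := IH spans lab st bmes (i + 1)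
      rw [show i + 1 - 1 = i from by ring] at hIH
      rw [hIH]
      have hrun : pvB_run (b, lab) (pvParse tag :: rest.map pvParse)
          = 1 + pvB_run (bmes, lab) (rest.map pvParse) := by
        rw [pvB_run, if_pos (by rw [hparse]; exact ⟨hc.1, hc.2.1, hc.2.2⟩)]
        rw [hparse, hc.2.2]
      rw [hrun]
      rw [show pvParse tag = (bmes, label) from hparse]
      push_cast
      rw [Nat.add_comm 1 _, List.drop_succ_cons]
      have e1 : i - 1 + (1 + ((pvB_run (bmes, lab) (rest.map pvParse) : ℕ) : ℤ))
          = i + (pvB_run (bmes, lab) (rest.map pvParse) : ℤ) := by ring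
      have e2 : i + (1 + ((pvB_run (bmes, lab) (rest.map pvParse) : ℕ) : ℤ))
          = i + 1 + (pvB_run (bmes, lab) (rest.map pvParse) : ℤ) := by ring
      rw [e1, e2]
    · -- boundary: every branch of A appends a fresh span
      have hrun : pvB_run (b, lab) (pvParse tag :: rest.map pvParse) = 0 := by
        rw [pvB_run, if_neg]
        rw [hparse]
        intro ⟨h1, h2, h3⟩
        exact hc ⟨h1, h2, h3⟩
      have step : pvA_loop (spans ++ [(lab, st, i - 1)]) (some b) i (tag :: rest)
          = pvA_loop ((spans ++ [(lab, st, i - 1)]) ++ [(label, i, i)]) (some bmes) (i + 1) rest := by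
        rw [pvA_loop]
        simp only [← hbm, ← hlb]
        by_cases hbs : bmes = "b" ∨ bmes = "s"
        · rw [if_pos hbs]
        · rw [if_neg hbs]
          simp only [List.getLast?_concat]
          rw [if_neg]
          intro ⟨h1, h2, h3⟩
          exact hc ⟨h1, by rcases h2 with h | h <;> simp_all, h3⟩
      rw [step]
      have hIH := IH (spans ++ [(lab, st, i - 1)]) label i bmes (i + 1)
      rw [show i + 1 - 1 = i from by ring] at hIH
      rw [hIH, hrun]
      rw [show pvParse tag = (bmes, label) from hparse]
      simp only [List.drop_zero]
      rw [specSpans_cons]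
      have e : i + 1 + ((pvB_run (bmes, label) (rest.map pvParse) : ℕ) : ℤ)
          = i + ((pvB_run (bmes, label) (rest.map pvParse) : ℕ) : ℤ) + 1 := by ring
      rw [e]
      simp

-- A's whole loop from the initial state produces exactly B's run decomposition
theorem pvA_eq_specSpans (tags : List String) :
    pvA_loop [] none 0 tags = specSpans 0 (tags.map pvParse) := by
  match tags with
  | [] => simp [pvA_loop, specSpans]
  | tag :: rest =>
    have hparse : pvParse tag =
        (PySem.Str.slice (PySem.Str.lower tag) none (some 1),
         PySem.Str.slice (PySem.Str.lower tag) (some 2) none) := rfl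
    set bmes := PySem.Str.slice (PySem.Str.lower tag) none (some 1) with hbm
    set label := PySem.Str.slice (PySem.Str.lower tag) (some 2) none with hlb
    have step : pvA_loop [] none 0 (tag :: rest)
        = pvA_loop ([] ++ [(label, 0, 1 - 1)]) (some bmes) 1 rest := by
      rw [pvA_loop]
      simp only [← hbm, ← hlb, List.getLast?_nil]
      by_cases hbs : bmes = "b" ∨ bmes = "s"
      · rw [if_pos hbs]; norm_num
      · rw [if_neg hbs]; norm_num
    rw [step, pvA_loop_eq]
    rw [List.map_cons, show pvParse tag = (bmes, label) from hparse, specSpans_cons]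
    simp only [List.nil_append]
    norm_num
    rw [show 1 + ((pvB_run (bmes, label) (rest.map pvParse) : ℕ) : ℤ)
          = ((pvB_run (bmes, label) (rest.map pvParse) : ℕ) : ℤ) + 1 from by ring]

-- B with the filter = (filter + map) of B without it
theorem pvB_spans_eq (ig : PySem.Set String) (l : List (String × String)) (i : Int) :
    pvB_spans ig i l
      = ((specSpans i l).filter (fun sp => !(PySem.Set.contains ig sp.1))).map
          (fun sp => (sp.1, (sp.2.1, sp.2.2 + 1))) := by
  induction i, l using specSpans.induct with
  | case1 i => simp [pvB_spans, specSpans]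
  | case2 i p rest k ih =>
    rw [pvB_spans, specSpans]
    have hk : pvB_run p rest = k := rfl
    rw [hk, ih]
    by_cases h : p.2 ∈ ig <;> simp [PySem.Set.contains, h]

-- ===== VERDICT (by name: the statement is the Claim_ definition above) =====
theorem bmes_tag_to_spans_py_spec : Claim_equal_bmes_tag_to_spans_py := by
  intro tags ignore_labels _hdom
  unfold Spec_bmes_tag_to_spans_py bmes_tag_to_spans_py bmes_tag_to_spans_py_alt
  rw [pvB_spans_eq, pvA_eq_specSpans]
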